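-- pv_equiv track=rewrite | github.com/DanOsad/Coding-Challenges | 6kyu/englishBeggars.py | beggars
-- ===== SOURCE A (Python) =====
-- def beggars(values, n):
--     b = []
--     if n > 0:
--         for num in range(n):
--             t = sum(values[num::n])
--             b.append(t)
--     else:
--         b = []
--     return b
-- ===== SOURCE B (Python) =====
-- def beggars(values, n):
--     if n <= 0:
--         return []
--     b = [0] * n
--     for i, v in enumerate(values):
--         b[i % n] += v
--     return b
-- ===== Notes on version B (the rewrite author's own statement) =====
-- stated objective: alternative
-- what changed: Replaces n strided-slice sums (one strided pass over values per beggar) with a single pass over values that distributes each value into a preallocated bucket at index i % n.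
import Mathlib
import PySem

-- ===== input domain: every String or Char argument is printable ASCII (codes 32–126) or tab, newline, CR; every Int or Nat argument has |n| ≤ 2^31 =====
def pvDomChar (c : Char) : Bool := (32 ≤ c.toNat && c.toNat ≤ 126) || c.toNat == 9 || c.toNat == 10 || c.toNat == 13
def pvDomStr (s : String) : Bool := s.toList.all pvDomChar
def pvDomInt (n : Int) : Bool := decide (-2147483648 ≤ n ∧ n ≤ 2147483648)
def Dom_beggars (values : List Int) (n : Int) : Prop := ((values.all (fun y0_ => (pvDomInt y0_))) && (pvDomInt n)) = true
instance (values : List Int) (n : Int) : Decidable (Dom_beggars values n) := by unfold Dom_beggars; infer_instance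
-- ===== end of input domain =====

-- B distributes each value in one pass into bucket i % n instead of A's n strided-slice sums; alternative decomposition, same cost.

-- ===== PORT A =====
-- hand port of the stepped slice values[j::step] for 0 ≤ j, 0 < step (exact there:
-- the elements at positions j, j+step, j+2*step, …)
def pyEvery (step : Nat) : List Int → List Int
  | [] => []
  | a :: t => a :: pyEvery step (t.drop (step - 1))
termination_by l => l.length
decreasing_by simp only [List.length_drop, List.length_cons]; omega

def beggars (values : List Int) (n : Int) : List Int :=
  if n > 0 then
    (PySem.List.pyRange 0 n 1).foldl
      (fun b num => b ++ [(pyEvery n.toNat (values.drop num.toNat)).sum]) []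
  else []

-- ===== PORT B =====
def beggars_alt (values : List Int) (n : Int) : List Int :=
  if n ≤ 0 then []
  else
    (PySem.List.enumerate values 0).foldl
      (fun b iv =>
        -- b[i % n] += v ; the index (i % n) is always in range, so getD's default never fires
        b.set (PySem.Int.mod iv.1 n).toNat ((b.getD (PySem.Int.mod iv.1 n).toNat 0) + iv.2))
      (List.replicate n.toNat 0)

-- ===== PRECONDITION & SPEC =====
def Spec_beggars (values : List Int) (n : Int) (out : List Int) : Prop := out = beggars_alt values n
instance (values : List Int) (n : Int) (out : List Int) : Decidable (Spec_beggars values n out) := by unfold Spec_beggars; infer_instance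

-- ===== CLAIM (what is proved, stated in full; the proofs are below) =====
def Claim_equal_beggars : Prop := ∀ (values : List Int) (n : Int), Dom_beggars values n → Spec_beggars values n (beggars values n)

-- ===== LEMMAS AND PROOFS =====

theorem pyEvery_nil (N : Nat) : pyEvery N [] = [] := by rw [pyEvery]

theorem pyEvery_cons (N : Nat) (a : Int) (t : List Int) :
    pyEvery N (a :: t) = a :: pyEvery N (t.drop (N - 1)) := by rw [pyEvery]

-- sum of the values distributed to bucket j, where the first element goes to bucket c
-- and the bucket index advances cyclically modulo N
def Csum (N : Nat) : List Int → Nat → Nat → Int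
  | [], _, _ => 0
  | v :: t, c, j => (if c = j then v else 0) + Csum N t (if c + 1 = N then 0 else c + 1) j

-- the cyclic distance from c forward to j (so that Csum at offset c is a rotation)
def delta (N c j : Nat) : Nat := if c ≤ j then j - c else N - (c - j)

-- successor of s modulo n, resolved into a case split (n > 0)
theorem emod_succ (n s : Int) (hn : 0 < n) :
    (s + 1) % n = if s % n = n - 1 then 0 else s % n + 1 := by
  have hmod := Int.emod_nonneg s (by omega : n ≠ 0)
  have hlt := Int.emod_lt_of_pos s hn
  have key : (s + 1) % n = (s % n + 1) % n := by
    conv_lhs => rw [← Int.emod_add_mul_ediv s n]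
    rw [show s % n + n * (s / n) + 1 = s % n + 1 + n * (s / n) by ring,
      Int.add_mul_emod_self_left]
  split_ifs with h
  · rw [key, h, show n - 1 + 1 = n by ring, Int.emod_self]
  · rw [key, Int.emod_eq_of_lt (by omega) (by omega)]

-- A's bucket j equals Csum at offset c, drop distance delta: A's bucket j equals Csum at offset 0
theorem pyEvery_sum_eq_Csum (N : Nat) (hN : 0 < N) :
    ∀ (xs : List Int) (c j : Nat), c < N → j < N →
      (pyEvery N (xs.drop (delta N c j))).sum = Csum N xs c j := by
  intro xs
  induction xs with
  | nil => intro c j _ _; simp [pyEvery_nil, Csum]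
  | cons v t ih =>
    intro c j hc hj
    by_cases h : c = j
    · subst h
      have hd : delta N c c = 0 := by unfold delta; simp
      rw [hd, List.drop_zero, pyEvery_cons, List.sum_cons]
      simp only [Csum, if_true]
      congr 1
      have hc' : (if c + 1 = N then 0 else c + 1) < N := by split_ifs <;> omega
      have hd' : delta N (if c + 1 = N then 0 else c + 1) c = N - 1 := by
        unfold delta; split_ifs <;> omega
      rw [← ih _ c hc' hj, hd']
    · have hpos : 0 < delta N c j := by unfold delta; split_ifs <;> omega
      obtain ⟨k, hk⟩ : ∃ k, delta N c j = k + 1 := ⟨delta N c j - 1, by omega⟩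
      rw [hk, List.drop_succ_cons]
      simp only [Csum, if_neg h, zero_add]
      have hc' : (if c + 1 = N then 0 else c + 1) < N := by split_ifs <;> omega
      have hd' : delta N (if c + 1 = N then 0 else c + 1) j = k := by
        unfold delta at hk ⊢; split_ifs at hk ⊢ <;> omega
      rw [← ih _ j hc' hj, hd']

-- the single-pass fold preserves the bucket list's length
theorem foldl_set_length (n : Int) :
    ∀ (l : List (Int × Int)) (b : List Int),
      (l.foldl (fun b iv =>
        b.set (PySem.Int.mod iv.1 n).toNat ((b.getD (PySem.Int.mod iv.1 n).toNat 0) + iv.2)) b).length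
      = b.length := by
  intro l
  induction l with
  | nil => intro b; simp
  | cons p t ih => intro b; rw [List.foldl, ih]; simp

-- bucket j of the single-pass fold = initial value + Csum starting at offset (s % n)
theorem foldl_set_getElem (n : Int) (hn : 0 < n) :
    ∀ (xs : List Int) (s : Int) (b : List Int) (j : Nat)
      (hb : b.length = n.toNat) (hj : j < n.toNat),
      ((PySem.List.enumerate xs s).foldl (fun b iv =>
        b.set (PySem.Int.mod iv.1 n).toNat ((b.getD (PySem.Int.mod iv.1 n).toNat 0) + iv.2)) b)[j]'
        (by rw [foldl_set_length, hb]; exact hj)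
      = b[j]'(by omega) + Csum n.toNat xs (s % n).toNat j := by
  intro xs
  induction xs with
  | nil => intro s b j hb hj; simp [PySem.List.enumerate_nil, Csum]
  | cons v t ih =>
    intro s b j hb hj
    rw [PySem.List.enumerate_cons]
    simp only [List.foldl]
    have hmod := Int.emod_nonneg s (by omega : n ≠ 0)
    have hlt := Int.emod_lt_of_pos s hn
    have hk : (PySem.Int.mod s n).toNat < b.length := by
      rw [PySem.Int.mod_eq_emod_of_pos hn, hb]; omega
    rw [ih (s + 1) _ j (by simp [hb]) hj]
    rw [List.getElem_set]
    have hmeq : PySem.Int.mod s n = s % n := PySem.Int.mod_eq_emod_of_pos hn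
    rw [hmeq] at hk
    have hsucc : ((s + 1) % n).toNat =
        if (s % n).toNat + 1 = n.toNat then 0 else (s % n).toNat + 1 := by
      rw [emod_succ n s hn]; split_ifs <;> omega
    simp only [Csum, hmeq, hsucc]
    by_cases h : (s % n).toNat = j
    · rw [if_pos h, if_pos h, List.getD_eq_getElem b 0 hk]
      simp only [h]
      ring
    · rw [if_neg h, if_neg h]; ring

theorem beggars_eq_alt (values : List Int) (n : Int) :
    beggars values n = beggars_alt values n := by
  by_cases hn : 0 < n
  · unfold beggars beggars_alt
    rw [if_pos hn, if_neg (by omega)]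
    have hN : 0 < n.toNat := by omega
    have hA : (PySem.List.pyRange 0 n 1).foldl
        (fun b num => b ++ [(pyEvery n.toNat (values.drop num.toNat)).sum]) []
        = (PySem.List.pyRange 0 n 1).map
            (fun num => (pyEvery n.toNat (values.drop num.toNat)).sum) := by
      generalize PySem.List.pyRange 0 n 1 = l
      induction l using List.reverseRecOn with
      | nil => rfl
      | append_singleton t x ih => simp [ih]
    rw [hA]
    apply List.ext_getElem
    · rw [foldl_set_length]
      simp [PySem.List.length_pyRange_one]
    · intro j hj₁ hj₂
      have hjN : j < n.toNat := by
        simpa [PySem.List.length_pyRange_one] using hj₁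
      rw [List.getElem_map]
      rw [foldl_set_getElem n hn values 0 _ j (by simp) hjN]
      have h0 : ((0 : Int) % n).toNat = 0 := by simp
      rw [List.getElem_replicate, h0, PySem.List.getElem_pyRange_one]
      have hd : delta n.toNat 0 j = j := by unfold delta; simp
      rw [← pyEvery_sum_eq_Csum n.toNat hN values 0 j hN hjN, hd]
      simp
  · unfold beggars beggars_alt
    rw [if_neg hn, if_pos (by omega)]

-- ===== VERDICT (by name: the statement is the Claim_ definition above) =====
theorem beggars_spec : Claim_equal_beggars := by
  intro values n _
  unfold Spec_beggars
  exact beggars_eq_alt values n
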